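-- pv_equiv track=rewrite | github.com/vinaynk/VLearnX | python/projects/wavsynth/basicmelody.py | elongate
-- ===== SOURCE A (Python) =====
-- def elongate(pat, dist=2):
--     'add dur to fill the silence'
--     rpat = [ fr.copy() if fr else None for fr in pat[::-1] ]
--     ctr  = 0
--     for fr in rpat:
--         if ctr >= dist and fr is not None:
--             fr[2] += ctr
--         if fr is None:
--             ctr += 1
--         else:
--             ctr = 0
--     rpat = rpat[::-1]
--     return rpat
-- ===== SOURCE B (Python) =====
-- def elongate(pat, dist=2):
--     'add dur to fill the silence'
--     # single forward pass: keep the pending note frame and a silence counter,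
--     # flush the pending frame (extended when the silence run is long enough)
--     # when the next note or the end of the pattern is reached
--     out = []
--     last = None
--     ctr = 0
--     for fr in pat:
--         if not fr:
--             ctr += 1
--         else:
--             if last is not None:
--                 if ctr >= dist:
--                     last = last[:2] + [last[2] + ctr] + last[3:]
--                 out.append(last)
--             out.extend([None] * ctr)
--             last = list(fr)
--             ctr = 0
--     if last is not None:
--         if ctr >= dist:
--             last = last[:2] + [last[2] + ctr] + last[3:]
--         out.append(last)
--     out.extend([None] * ctr)
--     return out
-- ===== Notes on version B (the rewrite author's own statement) =====
-- stated objective: alternative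
-- what changed: Replaces A's reverse-copy, backward silence-accumulating scan and second reverse with a single forward pass that keeps a pending note frame and a silence counter, flushing the pending frame (extended when the run is long enough) at the next note or at the end.
import Mathlib
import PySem

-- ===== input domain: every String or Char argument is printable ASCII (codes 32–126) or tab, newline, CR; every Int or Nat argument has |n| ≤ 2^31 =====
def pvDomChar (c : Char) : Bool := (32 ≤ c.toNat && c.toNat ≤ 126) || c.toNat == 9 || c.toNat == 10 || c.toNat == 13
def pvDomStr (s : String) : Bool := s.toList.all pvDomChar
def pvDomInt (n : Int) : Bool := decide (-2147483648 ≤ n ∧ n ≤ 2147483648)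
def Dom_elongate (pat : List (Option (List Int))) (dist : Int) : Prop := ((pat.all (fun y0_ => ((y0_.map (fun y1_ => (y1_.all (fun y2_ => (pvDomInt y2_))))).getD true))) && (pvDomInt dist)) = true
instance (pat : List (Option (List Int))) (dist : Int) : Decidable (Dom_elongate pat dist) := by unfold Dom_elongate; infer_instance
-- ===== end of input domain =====

-- B replaces A's reverse/backward-scan/reverse with one forward pass that flushes a
-- pending note frame together with the silence run behind it (objective: alternative).

-- ===== PORT A =====
-- 'fr.copy() if fr else None': a falsy frame (None or []) becomes None, others are copied
def copyA (fr : Option (List Int)) : Option (List Int) :=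
  match fr with
  | none => none
  | some l => if l = [] then none else some l

-- 'fr[2] += ctr'; if the frame has no index 2 Python raises IndexError (excluded by Pre_)
def bump (l : List Int) (ctr : Int) : List Int :=
  match PySem.List.pyGet? l 2 with
  | some v => l.set 2 (v + ctr)
  | none => l

-- the 'for fr in rpat' loop of A, with its running ctr
def loopA (dist : Int) (ctr : Int) : List (Option (List Int)) → List (Option (List Int))
  | [] => []
  | fr :: rest =>
    match fr with
    | none => none :: loopA dist (ctr + 1) rest
    | some l => (some (if ctr ≥ dist then bump l ctr else l)) :: loopA dist 0 rest

def elongate (pat : List (Option (List Int))) (dist : Int) : List (Option (List Int)) :=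
  let rpat := pat.reverse.map copyA
  (loopA dist 0 rpat).reverse

-- ===== PORT B =====
-- 'last[:2] + [last[2] + ctr] + last[3:]' (Python raises IndexError at last[2] when
-- the frame is shorter than 3; excluded by Pre_)
def fixFrame (l : List Int) (ctr : Int) : List Int :=
  l.take 2 ++ (match PySem.List.pyGet? l 2 with
               | some v => [v + ctr]
               | none => []) ++ l.drop 3

-- emit the pending note frame (extended when ctr ≥ dist) followed by the pending silence
def flushB (dist : Int) (last : Option (List Int)) (ctr : Int) : List (Option (List Int)) :=
  (match last with
   | none => []
   | some p => [some (if ctr ≥ dist then fixFrame p ctr else p)]) ++ List.replicate ctr.toNat none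

-- the forward loop of B, state = (pending note frame, silence counter)
def loopB (dist : Int) : List (Option (List Int)) → Option (List Int) → Int → List (Option (List Int))
  | [], last, ctr => flushB dist last ctr
  | fr :: rest, last, ctr =>
    match fr with
    | none => loopB dist rest last (ctr + 1)
    | some l =>
      if l = [] then loopB dist rest last (ctr + 1)
      else flushB dist last ctr ++ loopB dist rest (some l) 0

def elongate_alt (pat : List (Option (List Int))) (dist : Int) : List (Option (List Int)) :=
  loopB dist pat none 0

-- ===== PRECONDITION & SPEC =====
-- Pre_ excludes exactly the inputs on which both Pythons raise IndexError at 'fr[2]':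
-- a non-empty note frame shorter than 3 entries whose following silence run reaches dist
-- (a frame is silent iff it is None or empty, i.e. fr.getD [] = []); the run reaches dist
-- iff dist ≤ 0, or at least dist frames follow and the next dist frames are all silent.
def Pre_elongate (pat : List (Option (List Int))) (dist : Int) : Prop :=
  ∀ i, (h : i < pat.length) → ∀ l, pat[i] = some l →
    l = [] ∨ 3 ≤ l.length ∨
    (0 < dist ∧ ((((pat.drop (i + 1)).length : Int) < dist ∨
                  ∃ fr ∈ (pat.drop (i + 1)).take dist.toNat, fr.getD [] ≠ [])))
instance (pat : List (Option (List Int))) (dist : Int) : Decidable (Pre_elongate pat dist) := by unfold Pre_elongate; infer_instance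

def pvWitness_elongate : List (Option (List Int)) × Int :=
  ([some [60, 1, 2], none, none, some [55, 2, 1]], 2)

def Spec_elongate (pat : List (Option (List Int))) (dist : Int) (out : List (Option (List Int))) : Prop := out = elongate_alt pat dist
instance (pat : List (Option (List Int))) (dist : Int) (out : List (Option (List Int))) : Decidable (Spec_elongate pat dist out) := by unfold Spec_elongate; infer_instance

-- ===== CLAIM (what is proved, stated in full; the proofs are below) =====
def Claim_equal_elongate : Prop := ∀ (pat : List (Option (List Int))) (dist : Int), Dom_elongate pat dist → Pre_elongate pat dist → Spec_elongate pat dist (elongate pat dist)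

-- ===== LEMMAS AND PROOFS =====

-- forward-recursion characterisation of A: output list and the leading-silence run length
def goA (dist : Int) : List (Option (List Int)) → List (Option (List Int)) × Int
  | [] => ([], 0)
  | fr :: rest =>
    let r := goA dist rest
    match fr with
    | none => (none :: r.1, r.2 + 1)
    | some l => ((some (if r.2 ≥ dist then bump l r.2 else l)) :: r.1, 0)

-- ctr value after loopA consumes a list
def ctrA (c : Int) : List (Option (List Int)) → Int
  | [] => c
  | none :: rest => ctrA (c + 1) rest
  | some _ :: rest => ctrA 0 rest

theorem loopA_append (dist c : Int) (xs ys : List (Option (List Int))) :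
    loopA dist c (xs ++ ys) = loopA dist c xs ++ loopA dist (ctrA c xs) ys := by
  induction xs generalizing c with
  | nil => simp [loopA, ctrA]
  | cons fr rest ih =>
    cases fr <;> simp [loopA, ctrA, ih]

theorem ctrA_append (c : Int) (xs ys : List (Option (List Int))) :
    ctrA c (xs ++ ys) = ctrA (ctrA c xs) ys := by
  induction xs generalizing c with
  | nil => simp [ctrA]
  | cons fr rest ih => cases fr <;> simp [ctrA, ih]

theorem loopA_reverse (dist : Int) (q : List (Option (List Int))) :
    loopA dist 0 q.reverse = (goA dist q).1.reverse ∧ ctrA 0 q.reverse = (goA dist q).2 := by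
  induction q with
  | nil => simp [loopA, ctrA, goA]
  | cons fr rest ih =>
    have h1 := loopA_append dist 0 rest.reverse [fr]
    have h2 := ctrA_append 0 rest.reverse [fr]
    cases fr with
    | none =>
      refine ⟨?_, ?_⟩
      · simp only [List.reverse_cons, h1, ih.1, loopA, goA]
      · simp only [List.reverse_cons, h2, ih.2, ctrA, goA]
    | some l =>
      refine ⟨?_, ?_⟩
      · simp only [List.reverse_cons, h1, ih.1, loopA, goA]
        rw [ih.2]
      · simp only [List.reverse_cons, h2, ctrA, goA]

theorem elongate_eq_goA (pat : List (Option (List Int))) (dist : Int) :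
    elongate pat dist = (goA dist (pat.map copyA)).1 := by
  have h : pat.reverse.map copyA = (pat.map copyA).reverse := by
    simp [List.map_reverse]
  simp [elongate, h, (loopA_reverse dist (pat.map copyA)).1]

theorem pyGet2_long (a b x : Int) (t : List Int) :
    PySem.List.pyGet? (a :: b :: x :: t) 2 = some x := by
  simp [PySem.List.pyGet?, PySem.List.pyIdx?]
  rw [if_pos (by omega)]
  simp

theorem fixFrame_eq_bump (l : List Int) (c : Int) : fixFrame l c = bump l c := by
  match l with
  | [] => simp [fixFrame, bump, PySem.List.pyGet?, PySem.List.pyIdx?]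
  | [a] => simp [fixFrame, bump, PySem.List.pyGet?, PySem.List.pyIdx?]
  | [a, b] => simp [fixFrame, bump, PySem.List.pyGet?, PySem.List.pyIdx?]
  | a :: b :: x :: t =>
    simp [fixFrame, bump, pyGet2_long, List.set]

theorem repl_shift (c : Int) (hc : 0 ≤ c) (xs : List (Option (List Int))) :
    List.replicate (c + 1).toNat (none : Option (List Int)) ++ xs
      = List.replicate c.toNat none ++ none :: xs := by
  have h : (c + 1).toNat = c.toNat + 1 := by omega
  rw [h, List.replicate_succ']
  simp

theorem loopB_goA (dist : Int) (pat : List (Option (List Int))) :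
    ∀ c : Int, 0 ≤ c →
      (loopB dist pat none c
        = List.replicate c.toNat none ++ (goA dist (pat.map copyA)).1) ∧
      (∀ p, loopB dist pat (some p) c
        = some (if c + (goA dist (pat.map copyA)).2 ≥ dist
                then bump p (c + (goA dist (pat.map copyA)).2) else p)
          :: (List.replicate c.toNat none ++ (goA dist (pat.map copyA)).1)) := by
  induction pat with
  | nil =>
    intro c hc
    refine ⟨by simp [loopB, flushB, goA], fun p => ?_⟩
    simp [loopB, flushB, goA, fixFrame_eq_bump]
  | cons fr rest ih =>
    intro c hc
    match fr with
    | none =>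
      have ih' := ih (c + 1) (by omega)
      have e3 : goA dist ((none :: rest).map copyA)
          = (none :: (goA dist (rest.map copyA)).1, (goA dist (rest.map copyA)).2 + 1) := rfl
      have harith : c + 1 + (goA dist (rest.map copyA)).2
          = c + ((goA dist (rest.map copyA)).2 + 1) := by ring
      refine ⟨?_, fun p => ?_⟩
      · show loopB dist rest none (c + 1) = _
        rw [ih'.1, e3, repl_shift c hc]
      · show loopB dist rest (some p) (c + 1) = _
        rw [ih'.2 p, e3, harith, repl_shift c hc]
    | some l =>
      by_cases hl : l = []
      · subst hl
        have ih' := ih (c + 1) (by omega)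
        have e3 : goA dist ((some ([] : List Int) :: rest).map copyA)
            = (none :: (goA dist (rest.map copyA)).1, (goA dist (rest.map copyA)).2 + 1) := rfl
        have harith : c + 1 + (goA dist (rest.map copyA)).2
            = c + ((goA dist (rest.map copyA)).2 + 1) := by ring
        refine ⟨?_, fun p => ?_⟩
        · show loopB dist rest none (c + 1) = _
          rw [ih'.1, e3, repl_shift c hc]
        · show loopB dist rest (some p) (c + 1) = _
          rw [ih'.2 p, e3, harith, repl_shift c hc]
      · have ih' := ih 0 le_rfl
        have e3 : goA dist ((some l :: rest).map copyA)
            = (some (if (goA dist (rest.map copyA)).2 ≥ dist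
                     then bump l (goA dist (rest.map copyA)).2 else l)
                :: (goA dist (rest.map copyA)).1, 0) := by
          show goA dist (copyA (some l) :: rest.map copyA) = _
          simp [copyA, hl, goA]
        have eB : ∀ last c', loopB dist (some l :: rest) last c'
            = flushB dist last c' ++ loopB dist rest (some l) 0 := by
          intro last c'
          simp [loopB, hl]
        refine ⟨?_, fun p => ?_⟩
        · rw [eB, ih'.2 l, e3, flushB]
          simp
        · rw [eB, ih'.2 l, e3, flushB]
          simp [fixFrame_eq_bump]

theorem elongate_eq_alt (pat : List (Option (List Int))) (dist : Int) :
    elongate pat dist = elongate_alt pat dist := by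
  rw [elongate_eq_goA, elongate_alt, (loopB_goA dist pat 0 le_rfl).1]
  simp

-- ===== VERDICT (by name: the statement is the Claim_ definition above) =====
theorem elongate_spec : Claim_equal_elongate := by
  intro pat dist _ _
  unfold Spec_elongate
  exact elongate_eq_alt pat dist
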